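-- pv_equiv track=rewrite | github.com/parimal1009/Karbon_Card | src/agent.py | _fix_basic_syntax
-- ===== SOURCE A (Python) =====
-- def _fix_basic_syntax(code: str) -> str:
--     """Fix basic syntax issues in generated code."""
--     try:
--         lines = code.split('\n')
--         fixed_lines = []
--
--         for line in lines:
--             # Fix common issues
--             line = line.replace('```', '')  # Remove any remaining markdown
--             line = line.replace('python', '')  # Remove language specifier
--
--             # Skip empty lines at the beginning
--             if not fixed_lines and not line.strip():
--                 continue
--
--             fixed_lines.append(line)
--
--         return '\n'.join(fixed_lines)
--     except Exception:
--         return code  # Return original if fixing fails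
-- ===== SOURCE B (Python) =====
-- def _fix_basic_syntax(code: str) -> str:
--     """Fix basic syntax issues in generated code."""
--     # Phase 1: clean every line; Phase 2: drop the leading blank lines.
--     cleaned = [l.replace('```', '').replace('python', '') for l in code.split('\n')]
--     while cleaned and not cleaned[0].strip():
--         cleaned.pop(0)
--     return '\n'.join(cleaned)
-- ===== Notes on version B (the rewrite author's own statement) =====
-- stated objective: alternative
-- what changed: A's single fused loop (skip blank lines while the accumulator is still empty, clean and append otherwise) is split into two phases: a map that cleans every line, then a dropWhile that removes the leading blank lines, joined at the end.
import Mathlib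
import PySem

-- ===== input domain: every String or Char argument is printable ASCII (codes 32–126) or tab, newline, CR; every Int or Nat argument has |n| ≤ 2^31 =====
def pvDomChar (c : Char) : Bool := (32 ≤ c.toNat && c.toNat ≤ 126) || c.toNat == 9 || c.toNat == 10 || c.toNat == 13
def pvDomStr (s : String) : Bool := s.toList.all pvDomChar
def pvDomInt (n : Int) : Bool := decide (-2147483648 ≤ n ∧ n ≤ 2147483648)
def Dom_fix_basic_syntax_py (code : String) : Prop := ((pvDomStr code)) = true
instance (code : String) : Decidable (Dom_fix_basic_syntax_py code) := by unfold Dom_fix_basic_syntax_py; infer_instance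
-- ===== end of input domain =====

-- B replaces A's fused skip-while-accumulator-empty loop by two phases: map-clean every line,
-- then drop the leading blank lines (alternative decomposition, same cost).

-- ===== PORT A =====
-- the per-line cleanup of A: line.replace('```','').replace('python','')
def pvCleanA (line : String) : String :=
  PySem.Str.replace (PySem.Str.replace line "```" "") "python" ""

-- A's loop body: clean the line, skip it while fixed_lines is still empty and it is blank
def pvStepA (fixed_lines : List String) (line : String) : List String :=
  let line := pvCleanA line
  if fixed_lines.isEmpty && (PySem.Str.strip line == "") then fixed_lines
  else fixed_lines ++ [line]

def fix_basic_syntax_py (code : String) : String :=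
  -- A's try/except is dead: nothing in the body can raise, so the port is the try-body.
  let lines := (PySem.Str.split? code "\n").getD []   -- sep ≠ "", so split? is always `some`
  let fixed_lines := lines.foldl pvStepA []
  PySem.Str.join "\n" fixed_lines

-- ===== PORT B =====
-- the per-line cleanup of B's comprehension
def pvCleanB (l : String) : String :=
  PySem.Str.replace (PySem.Str.replace l "```" "") "python" ""

def fix_basic_syntax_py_alt (code : String) : String :=
  let cleaned := ((PySem.Str.split? code "\n").getD []).map pvCleanB   -- sep ≠ "", so split? is always `some`
  -- the 'while cleaned and not cleaned[0].strip(): cleaned.pop(0)' loop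
  PySem.Str.join "\n" (cleaned.dropWhile (fun l => PySem.Str.strip l == ""))

-- ===== PRECONDITION & SPEC =====
def Spec_fix_basic_syntax_py (code : String) (out : String) : Prop := out = fix_basic_syntax_py_alt code
instance (code : String) (out : String) : Decidable (Spec_fix_basic_syntax_py code out) := by unfold Spec_fix_basic_syntax_py; infer_instance

-- ===== CLAIM (what is proved, stated in full; the proofs are below) =====
def Claim_equal_fix_basic_syntax_py : Prop := ∀ (code : String), Dom_fix_basic_syntax_py code → Spec_fix_basic_syntax_py code (fix_basic_syntax_py code)

-- ===== LEMMAS AND PROOFS =====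

-- once the accumulator is nonempty, A's loop appends every cleaned line
theorem pv_foldl_nonempty (ls : List String) (acc : List String) (h : acc.isEmpty = false) :
    ls.foldl pvStepA acc = acc ++ ls.map pvCleanA := by
  induction ls generalizing acc with
  | nil => simp
  | cons l ls ih =>
    have hstep : pvStepA acc l = acc ++ [pvCleanA l] := by
      simp [pvStepA, h]
    rw [List.foldl_cons, hstep, ih (acc ++ [pvCleanA l]) (by simp)]
    simp

-- from the empty accumulator, A's loop is dropWhile-blank over the cleaned lines
theorem pv_foldl_empty (ls : List String) :
    ls.foldl pvStepA [] =
    (ls.map pvCleanA).dropWhile (fun l => PySem.Str.strip l == "") := by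
  induction ls with
  | nil => simp
  | cons l ls ih =>
    rw [List.foldl_cons, List.map_cons, List.dropWhile_cons]
    by_cases hb : (PySem.Str.strip (pvCleanA l) == "") = true
    · have hstep : pvStepA [] l = [] := by simp [pvStepA, hb]
      rw [hstep, hb, if_pos rfl, ih]
    · simp only [Bool.not_eq_true] at hb
      have hstep : pvStepA [] l = [pvCleanA l] := by simp [pvStepA, hb]
      rw [hstep, hb, pv_foldl_nonempty ls [pvCleanA l] (by simp)]
      simp

-- ===== VERDICT (by name: the statement is the Claim_ definition above) =====
theorem fix_basic_syntax_py_spec : Claim_equal_fix_basic_syntax_py := by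
  intro code _
  show _ = _
  have hAB : pvCleanB = pvCleanA := rfl
  simp only [fix_basic_syntax_py, fix_basic_syntax_py_alt, hAB, pv_foldl_empty]
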